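-- pv_equiv track=rewrite | github.com/mi7hra-shubham/Kuvaka-Tech | backend.py | classify_industry_match
-- ===== SOURCE A (Python) =====
-- def classify_industry_match(lead_industry: str, offer_icps: list[str]) -> int:
--     if not lead_industry:
--         return 0
--     li = lead_industry.strip().lower()
--     for icp in offer_icps:
--         if icp.strip().lower() == li:
--             return 20
--     for icp in offer_icps:
--         icpl = icp.strip().lower()
--         if icpl in li or li in icpl:
--             return 10
--     return 0
-- ===== SOURCE B (Python) =====
-- def classify_industry_match(lead_industry: str, offer_icps: list[str]) -> int:
--     if not lead_industry:
--         return 0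
--     li = lead_industry.strip().lower()
--     found_partial = False
--     for icp in offer_icps:
--         icpl = icp.strip().lower()
--         if icpl == li:
--             return 20
--         if icpl in li or li in icpl:
--             found_partial = True
--     return 10 if found_partial else 0
-- ===== Notes on version B (the rewrite author's own statement) =====
-- stated objective: simpler
-- what changed: The two sequential scans over offer_icps are fused into one pass that returns 20 immediately on an exact match and records partial matches in a flag resolved after the loop, so each icp is stripped/lowered once instead of twice.
import Mathlib
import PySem

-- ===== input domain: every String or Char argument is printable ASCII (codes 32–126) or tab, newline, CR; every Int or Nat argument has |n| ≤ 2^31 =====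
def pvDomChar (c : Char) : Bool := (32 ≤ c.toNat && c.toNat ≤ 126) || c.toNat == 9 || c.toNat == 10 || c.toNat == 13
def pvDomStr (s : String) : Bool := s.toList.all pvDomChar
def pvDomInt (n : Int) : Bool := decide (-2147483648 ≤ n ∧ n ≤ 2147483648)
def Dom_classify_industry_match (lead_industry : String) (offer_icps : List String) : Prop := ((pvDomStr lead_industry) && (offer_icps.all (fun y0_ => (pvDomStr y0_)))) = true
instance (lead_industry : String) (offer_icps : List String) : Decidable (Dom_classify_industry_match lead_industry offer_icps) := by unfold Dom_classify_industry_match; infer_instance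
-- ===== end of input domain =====

-- B fuses A's two scans over offer_icps into one pass with a partial-match flag; objective: simpler (one pass, each icp normalised once).

-- ===== PORT A =====
-- first loop of A: return 20 on an exact match
def pvA_exactLoop (li : String) : List String → Option Int
  | [] => none
  | icp :: rest =>
    if PySem.Str.lower (PySem.Str.strip icp) = li then some 20
    else pvA_exactLoop li rest

-- second loop of A: return 10 on a partial (substring either way) match
def pvA_partialLoop (li : String) : List String → Option Int
  | [] => none
  | icp :: rest =>
    let icpl := PySem.Str.lower (PySem.Str.strip icp)
    if PySem.Str.isIn icpl li || PySem.Str.isIn li icpl then some 10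
    else pvA_partialLoop li rest

def classify_industry_match (lead_industry : String) (offer_icps : List String) : Int :=
  if lead_industry = "" then 0
  else
    let li := PySem.Str.lower (PySem.Str.strip lead_industry)
    match pvA_exactLoop li offer_icps with
    | some v => v
    | none =>
      match pvA_partialLoop li offer_icps with
      | some v => v
      | none => 0

-- ===== PORT B =====
-- single pass: return 20 immediately on exact, carry a partial-match flag, resolve it after the loop
def pvB_loop (li : String) (found_partial : Bool) : List String → Int
  | [] => if found_partial then 10 else 0
  | icp :: rest =>
    let icpl := PySem.Str.lower (PySem.Str.strip icp)
    if icpl = li then 20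
    else pvB_loop li (found_partial || (PySem.Str.isIn icpl li || PySem.Str.isIn li icpl)) rest

def classify_industry_match_alt (lead_industry : String) (offer_icps : List String) : Int :=
  if lead_industry = "" then 0
  else pvB_loop (PySem.Str.lower (PySem.Str.strip lead_industry)) false offer_icps

-- ===== PRECONDITION & SPEC =====
def Spec_classify_industry_match (lead_industry : String) (offer_icps : List String) (out : Int) : Prop := out = classify_industry_match_alt lead_industry offer_icps
instance (lead_industry : String) (offer_icps : List String) (out : Int) : Decidable (Spec_classify_industry_match lead_industry offer_icps out) := by unfold Spec_classify_industry_match; infer_instance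

-- ===== CLAIM (what is proved, stated in full; the proofs are below) =====
def Claim_equal_classify_industry_match : Prop := ∀ (lead_industry : String) (offer_icps : List String), Dom_classify_industry_match lead_industry offer_icps → Spec_classify_industry_match lead_industry offer_icps (classify_industry_match lead_industry offer_icps)

-- ===== LEMMAS AND PROOFS =====
def pvExact (li icp : String) : Bool := PySem.Str.lower (PySem.Str.strip icp) == li
def pvPartial (li icp : String) : Bool :=
  PySem.Str.isIn (PySem.Str.lower (PySem.Str.strip icp)) li ||
  PySem.Str.isIn li (PySem.Str.lower (PySem.Str.strip icp))

theorem pvA_exactLoop_eq (li : String) (l : List String) :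
    pvA_exactLoop li l = if l.any (pvExact li) then some 20 else none := by
  induction l with
  | nil => simp [pvA_exactLoop]
  | cons icp rest ih =>
    simp only [pvA_exactLoop, List.any_cons, pvExact, ih]
    by_cases h : PySem.Str.lower (PySem.Str.strip icp) = li <;> simp [h]

theorem pvA_partialLoop_eq (li : String) (l : List String) :
    pvA_partialLoop li l = if l.any (pvPartial li) then some 10 else none := by
  induction l with
  | nil => simp [pvA_partialLoop]
  | cons icp rest ih =>
    show (if pvPartial li icp = true then some 10 else pvA_partialLoop li rest) = _
    rw [List.any_cons, ih]
    cases hp : pvPartial li icp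
    · simp [hp]
    · simp

theorem pvB_loop_eq (li : String) (l : List String) (found : Bool) :
    pvB_loop li found l =
      if l.any (pvExact li) then 20
      else if found || l.any (pvPartial li) then 10 else 0 := by
  induction l generalizing found with
  | nil => simp [pvB_loop]
  | cons icp rest ih =>
    simp only [pvB_loop, List.any_cons, pvExact, pvPartial, ih]
    by_cases h : PySem.Str.lower (PySem.Str.strip icp) = li
    · simp [h]
    · by_cases hp : (PySem.Str.isIn (PySem.Str.lower (PySem.Str.strip icp)) li ||
          PySem.Str.isIn li (PySem.Str.lower (PySem.Str.strip icp))) = true <;>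
        simp [h, Bool.or_comm, Bool.or_left_comm]

-- ===== VERDICT (by name: the statement is the Claim_ definition above) =====
theorem classify_industry_match_spec : Claim_equal_classify_industry_match := by
  intro lead_industry offer_icps _
  unfold Spec_classify_industry_match classify_industry_match classify_industry_match_alt
  by_cases he : lead_industry = ""
  · simp [he]
  · simp only [he, if_false]
    rw [pvA_exactLoop_eq, pvA_partialLoop_eq, pvB_loop_eq]
    by_cases h1 : offer_icps.any (pvExact (PySem.Str.lower (PySem.Str.strip lead_industry))) <;>
      by_cases h2 : offer_icps.any (pvPartial (PySem.Str.lower (PySem.Str.strip lead_industry))) <;>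
        simp [h1, h2]
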